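-- pv_equiv track=rewrite | github.com/Altynai/LeetCode | numbers-with-repeated-digits/answer.py | countByLength
-- ===== SOURCE A (Python) =====
-- def countByLength(l):
--     if l < 1:
--         return 0
--     ans, available = 9, 9
--     while l > 1:
--         ans *= available
--         available -= 1
--         l -= 1
--     return ans
-- ===== SOURCE B (Python) =====
-- import math
--
-- def countByLength(l):
--     if l < 1:
--         return 0
--     return 9 * math.perm(9, l - 1)
-- ===== Notes on version B (the rewrite author's own statement) =====
-- stated objective: simpler
-- what changed: Replaces the iterative falling-factorial while-loop with the closed form 9 * math.perm(9, l-1), which agrees with A everywhere including where A's product collapses to zero.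
import Mathlib
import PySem

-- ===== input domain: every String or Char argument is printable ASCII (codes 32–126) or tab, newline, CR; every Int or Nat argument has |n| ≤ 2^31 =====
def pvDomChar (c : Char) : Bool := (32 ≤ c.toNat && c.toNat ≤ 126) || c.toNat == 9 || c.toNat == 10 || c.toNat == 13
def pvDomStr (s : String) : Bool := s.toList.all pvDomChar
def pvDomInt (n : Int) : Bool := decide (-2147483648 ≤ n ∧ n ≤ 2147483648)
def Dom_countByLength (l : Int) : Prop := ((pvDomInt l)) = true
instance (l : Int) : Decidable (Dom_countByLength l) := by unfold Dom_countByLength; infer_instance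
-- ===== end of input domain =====

-- B replaces A's iterative falling-factorial loop with the closed form 9 * perm(9, l-1) (simpler).


-- ===== PORT A =====
-- the while-loop of A, state (ans, available, l), decreasing on l.toNat
def countByLengthLoop (ans available l : Int) : Int :=
  if h : l > 1 then countByLengthLoop (ans * available) (available - 1) (l - 1) else ans
termination_by l.toNat
decreasing_by omega

def countByLength (l : Int) : Int :=
  if l < 1 then 0 else countByLengthLoop 9 9 l

-- ===== PORT B =====
-- math.perm(9, k) ported as Nat.descFactorial 9 k (the library falling factorial)
def countByLength_alt (l : Int) : Int :=
  if l < 1 then 0 else 9 * (Nat.descFactorial 9 (l - 1).toNat : Int)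

-- ===== PRECONDITION & SPEC =====
def Spec_countByLength (l : Int) (out : Int) : Prop := out = countByLength_alt l
instance (l : Int) (out : Int) : Decidable (Spec_countByLength l out) := by unfold Spec_countByLength; infer_instance

-- ===== CLAIM (what is proved, stated in full; the proofs are below) =====
def Claim_equal_countByLength : Prop := ∀ (l : Int), Dom_countByLength l → Spec_countByLength l (countByLength l)

-- ===== LEMMAS AND PROOFS =====

-- falling factorial over Int, as A's loop computes it (may run past zero)
def intFall (a : Int) : Nat → Int
  | 0 => 1
  | k + 1 => a * intFall (a - 1) k

theorem countByLengthLoop_eq (k : Nat) : ∀ (ans av : Int),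
    countByLengthLoop ans av ((k : Int) + 1) = ans * intFall av k := by
  induction k with
  | zero => intro ans av; rw [countByLengthLoop]; simp [intFall]
  | succ n ih =>
    intro ans av
    rw [countByLengthLoop, dif_pos (by push_cast; omega)]
    have h : ((↑(n + 1) : Int) + 1) - 1 = (n : Int) + 1 := by push_cast; ring
    rw [h, ih, intFall, mul_assoc]

theorem intFall_eq_descFactorial (k : Nat) : ∀ (n : Nat),
    intFall (n : Int) k = (Nat.descFactorial n k : Int) := by
  induction k with
  | zero => intro n; simp [intFall]
  | succ m ih =>
    intro n
    cases n with
    | zero => simp [intFall]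
    | succ p =>
      rw [intFall, Nat.succ_descFactorial_succ]
      have : ((p + 1 : Nat) : Int) - 1 = (p : Int) := by push_cast; ring
      rw [this, ih p]; push_cast; ring

-- ===== VERDICT (by name: the statement is the Claim_ definition above) =====
theorem countByLength_spec : Claim_equal_countByLength := by
  intro l _
  unfold Spec_countByLength countByLength countByLength_alt
  by_cases h : l < 1
  · simp [h]
  · rw [if_neg h, if_neg h]
    have hk : l = ((l - 1).toNat : Int) + 1 := by omega
    rw [hk, countByLengthLoop_eq]
    have ht : ((((l - 1).toNat : Int) + 1 - 1)).toNat = (l - 1).toNat := by omega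
    have h9 : (9 : Int) = ((9 : Nat) : Int) := by norm_num
    rw [ht, h9, intFall_eq_descFactorial]
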